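-- pv_equiv track=rewrite | github.com/aquamarine5/AlgorithmsPractice-archive | py/p10999.py | toQuaternary
-- ===== SOURCE A (Python) =====
-- def toQuaternary(n):
--     if n == 0:
--         return 0
--     digits = []
--     while n:
--         digits.append(n % 4)
--         n //= 4
--     return sum(digits)
-- ===== SOURCE B (Python) =====
-- def toQuaternary(n):
--     if n == 0:
--         return 0
--     return n % 4 + toQuaternary(n // 4)
-- ===== Notes on version B (the rewrite author's own statement) =====
-- stated objective: simpler
-- what changed: Replaces the while-loop that accumulates base-four digits into a list and sums them with a direct recursion adding the lowest digit to the digit sum of the quotient, keeping no list at all; Pre_ excludes negative inputs, where A loops forever.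
import Mathlib
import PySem

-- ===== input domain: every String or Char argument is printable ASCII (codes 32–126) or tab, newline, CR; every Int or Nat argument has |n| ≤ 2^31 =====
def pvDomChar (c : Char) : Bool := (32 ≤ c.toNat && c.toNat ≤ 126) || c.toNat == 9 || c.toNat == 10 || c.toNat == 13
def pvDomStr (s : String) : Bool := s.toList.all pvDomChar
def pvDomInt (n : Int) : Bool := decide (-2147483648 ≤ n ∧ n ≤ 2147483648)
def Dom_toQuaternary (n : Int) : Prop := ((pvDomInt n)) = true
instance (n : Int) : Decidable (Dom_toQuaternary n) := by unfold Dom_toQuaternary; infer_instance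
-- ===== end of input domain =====

-- B replaces A's while-loop-plus-list accumulation with a direct recurrence
-- n % 4 + toQuaternary(n // 4); same value, simpler structure.


-- ===== PORT A =====
-- A's while loop 'while n: digits.append(n % 4); n //= 4' (fuel only makes the
-- recursion total in Lean; on Pre_ it never runs out)
def toQuaternaryLoop : Nat → Int → List Int → List Int
  | 0, _, digits => digits
  | fuel+1, n, digits =>
      if n ≠ 0 then toQuaternaryLoop fuel (PySem.Int.floordiv n 4) (digits ++ [PySem.Int.mod n 4])
      else digits

def toQuaternary (n : Int) : Int :=
  if n = 0 then 0
  else (toQuaternaryLoop (n.toNat + 1) n []).sum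

-- ===== PORT B =====
-- B's recurrence (fuel makes it total; on Pre_ it never runs out)
def toQuaternaryAltGo : Nat → Int → Int
  | 0, _ => 0
  | fuel+1, n =>
      if n = 0 then 0
      else PySem.Int.mod n 4 + toQuaternaryAltGo fuel (PySem.Int.floordiv n 4)

def toQuaternary_alt (n : Int) : Int := toQuaternaryAltGo (n.toNat + 1) n

-- ===== PRECONDITION & SPEC =====
-- A loops forever on negative n (n //= 4 stabilises at -1), so Pre_ is n ≥ 0.
def Pre_toQuaternary (n : Int) : Prop := 0 ≤ n
instance (n : Int) : Decidable (Pre_toQuaternary n) := by unfold Pre_toQuaternary; infer_instance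
def pvWitness_toQuaternary : Int := 57

def Spec_toQuaternary (n : Int) (out : Int) : Prop := out = toQuaternary_alt n
instance (n : Int) (out : Int) : Decidable (Spec_toQuaternary n out) := by unfold Spec_toQuaternary; infer_instance

-- ===== CLAIM (what is proved, stated in full; the proofs are below) =====
def Claim_equal_toQuaternary : Prop := ∀ (n : Int), Dom_toQuaternary n → Pre_toQuaternary n → Spec_toQuaternary n (toQuaternary n)

-- ===== LEMMAS AND PROOFS =====

lemma pvStep (n : Int) (hn : 0 < n) :
    0 ≤ PySem.Int.floordiv n 4 ∧ (PySem.Int.floordiv n 4).toNat < n.toNat := by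
  rw [PySem.Int.floordiv_eq_ediv_of_pos (by omega : (0:Int) < 4)]
  omega

lemma pvLoop_sum : ∀ (fuel : Nat) (n : Int) (digits : List Int), 0 ≤ n → n.toNat < fuel →
    (toQuaternaryLoop fuel n digits).sum = digits.sum + toQuaternaryAltGo fuel n := by
  intro fuel
  induction fuel with
  | zero => intro n _ _ h; omega
  | succ f ih =>
    intro n digits hn hf
    simp only [toQuaternaryLoop, toQuaternaryAltGo]
    by_cases h0 : n = 0
    · simp [h0]
    · simp only [h0, if_false, ne_eq, not_false_eq_true, if_true]
      obtain ⟨hp, hlt⟩ := pvStep n (by omega)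
      rw [ih _ _ hp (by omega)]
      simp [add_assoc]

-- ===== VERDICT (by name: the statement is the Claim_ definition above) =====
theorem toQuaternary_spec : Claim_equal_toQuaternary := by
  intro n _ hpre
  unfold Spec_toQuaternary toQuaternary toQuaternary_alt
  by_cases h0 : n = 0
  · simp [h0, toQuaternaryAltGo]
  · simp only [h0, if_false]
    rw [pvLoop_sum (n.toNat + 1) n [] hpre (by omega)]
    simp
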